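-- pv_equiv track=rewrite | github.com/croghostrider/knxmap | knxmap/targets.py | is_valid_group_address
-- ===== SOURCE A (Python) =====
-- def is_valid_group_address(address):
--     """See <https://support.knx.org/hc/de/articles/115003188109-Gruppenadressen>."""
--     assert isinstance(address, str)
--     try:
--         parts = [int(i) for i in address.split("/")]
--     except ValueError:
--         return False
--     if len(parts) < 2 or len(parts) > 3:
--         return False
--     if len(parts) == 3:
--         if parts[0] < 0 or parts[0] > 31:
--             return False
--         if parts[1] < 0 or parts[1] > 7:
--             return False
--         if parts[2] < 0 or parts[2] > 255:
--             return False
--         if parts[0] == 0 and parts[1] == 0 and parts[2] == 0: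
--             return False
--     if len(parts) == 2:
--         if parts[0] < 0 or parts[0] > 31:
--             return False
--         if parts[1] < 0 or parts[1] > 2047:
--             return False
--         if parts[0] == 0 and parts[1] == 0:
--             return False
--     return True
-- ===== SOURCE B (Python) =====
-- def is_valid_group_address(address):
--     """Pack the address into the 16-bit raw KNX group-address value and range-check it."""
--     assert isinstance(address, str)
--     try:
--         parts = [int(i) for i in address.split("/")]
--     except ValueError:
--         return False
--     if len(parts) == 2:
--         main, sub = parts
--         if main < 0 or not 0 <= sub < 2048:
--             return False
--         raw = main * 2048 + sub
--     elif len(parts) == 3: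
--         main, mid, sub = parts
--         if main < 0 or not 0 <= mid < 8 or not 0 <= sub < 256:
--             return False
--         raw = main * 2048 + mid * 256 + sub
--     else:
--         return False
--     return 1 <= raw <= 0xFFFF
-- ===== Notes on version B (the rewrite author's own statement) =====
-- stated objective: alternative
-- what changed: B validates by packing the parts into the 16-bit raw KNX address (main*2048 + mid*256 + sub) after bounding only the non-leading fields by their radices; a single range check 1 <= raw <= 0xFFFF replaces A's per-field upper-bound chain and the explicit all-zero test.
import Mathlib
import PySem

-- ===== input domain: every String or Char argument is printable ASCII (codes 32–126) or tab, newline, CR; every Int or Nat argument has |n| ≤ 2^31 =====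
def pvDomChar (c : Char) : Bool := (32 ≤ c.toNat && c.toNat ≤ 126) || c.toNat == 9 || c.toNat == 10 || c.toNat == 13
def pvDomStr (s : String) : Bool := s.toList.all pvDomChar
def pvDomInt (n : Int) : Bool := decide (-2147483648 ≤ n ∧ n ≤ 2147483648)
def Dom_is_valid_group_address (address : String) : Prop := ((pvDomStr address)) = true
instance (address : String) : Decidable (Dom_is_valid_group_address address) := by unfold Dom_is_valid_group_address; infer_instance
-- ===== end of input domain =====

-- B packs the parts into the 16-bit raw KNX address value and validates it with one
-- range check 1 <= raw <= 0xFFFF, instead of A's per-field bound chain plus all-zero test (alternative).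


-- ===== PORT A =====
def is_valid_group_address (address : String) : Bool :=
  -- parts = [int(i) for i in address.split("/")]; except ValueError: return False
  match (PySem.Chars.splitOn address.toList ['/']).mapM PySem.Int.ofChars? with
  | none => false
  | some parts =>
    if parts.length < 2 ∨ parts.length > 3 then false
    else
      -- if len(parts) == 3: the four checks, in order
      if parts.length = 3 ∧
          (parts.getD 0 0 < 0 ∨ parts.getD 0 0 > 31 ∨
           parts.getD 1 0 < 0 ∨ parts.getD 1 0 > 7 ∨
           parts.getD 2 0 < 0 ∨ parts.getD 2 0 > 255 ∨
           (parts.getD 0 0 = 0 ∧ parts.getD 1 0 = 0 ∧ parts.getD 2 0 = 0)) then false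
      -- if len(parts) == 2: the three checks, in order
      else if parts.length = 2 ∧
          (parts.getD 0 0 < 0 ∨ parts.getD 0 0 > 31 ∨
           parts.getD 1 0 < 0 ∨ parts.getD 1 0 > 2047 ∨
           (parts.getD 0 0 = 0 ∧ parts.getD 1 0 = 0)) then false
      else true

-- ===== PORT B =====
def is_valid_group_address_alt (address : String) : Bool :=
  match (PySem.Chars.splitOn address.toList ['/']).mapM PySem.Int.ofChars? with
  | none => false
  | some parts =>
    match parts with
    | [main, sub] =>            -- len(parts) == 2
      if main < 0 ∨ ¬ (0 ≤ sub ∧ sub < 2048) then false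
      else
        let raw := main * 2048 + sub
        decide (1 ≤ raw ∧ raw ≤ 0xFFFF)
    | [main, mid, sub] =>       -- len(parts) == 3
      if main < 0 ∨ ¬ (0 ≤ mid ∧ mid < 8) ∨ ¬ (0 ≤ sub ∧ sub < 256) then false
      else
        let raw := main * 2048 + mid * 256 + sub
        decide (1 ≤ raw ∧ raw ≤ 0xFFFF)
    | _ => false

-- ===== PRECONDITION & SPEC =====
def Spec_is_valid_group_address (address : String) (out : Bool) : Prop := out = is_valid_group_address_alt address
instance (address : String) (out : Bool) : Decidable (Spec_is_valid_group_address address out) := by unfold Spec_is_valid_group_address; infer_instance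

-- ===== CLAIM (what is proved, stated in full; the proofs are below) =====
def Claim_equal_is_valid_group_address : Prop := ∀ (address : String), Dom_is_valid_group_address address → Spec_is_valid_group_address address (is_valid_group_address address)

-- ===== LEMMAS AND PROOFS =====

-- the two post-parse bodies agree on every list of parsed parts
lemma bodies_eq (parts : List Int) :
    (if parts.length < 2 ∨ parts.length > 3 then false
     else
      if parts.length = 3 ∧
          (parts.getD 0 0 < 0 ∨ parts.getD 0 0 > 31 ∨
           parts.getD 1 0 < 0 ∨ parts.getD 1 0 > 7 ∨
           parts.getD 2 0 < 0 ∨ parts.getD 2 0 > 255 ∨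
           (parts.getD 0 0 = 0 ∧ parts.getD 1 0 = 0 ∧ parts.getD 2 0 = 0)) then false
      else if parts.length = 2 ∧
          (parts.getD 0 0 < 0 ∨ parts.getD 0 0 > 31 ∨
           parts.getD 1 0 < 0 ∨ parts.getD 1 0 > 2047 ∨
           (parts.getD 0 0 = 0 ∧ parts.getD 1 0 = 0)) then false
      else true) =
    (match parts with
     | [main, sub] =>
       if main < 0 ∨ ¬ (0 ≤ sub ∧ sub < 2048) then false
       else
         let raw := main * 2048 + sub
         decide (1 ≤ raw ∧ raw ≤ 0xFFFF)
     | [main, mid, sub] =>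
       if main < 0 ∨ ¬ (0 ≤ mid ∧ mid < 8) ∨ ¬ (0 ≤ sub ∧ sub < 256) then false
       else
         let raw := main * 2048 + mid * 256 + sub
         decide (1 ≤ raw ∧ raw ≤ 0xFFFF)
     | _ => false) := by
  match parts with
  | [] => rfl
  | [a] => rfl
  | [a, b] =>
    simp only [List.length_cons, List.length_nil, List.getD,
      List.getElem?_cons_zero, List.getElem?_cons_succ, Option.getD_some]
    norm_num
    rw [Bool.eq_iff_iff]
    simp only [Bool.and_eq_true, Bool.or_eq_true, Bool.not_eq_true', decide_eq_true_eq,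
      decide_eq_false_iff_not]
    omega
  | [a, b, c] =>
    simp only [List.length_cons, List.length_nil, List.getD,
      List.getElem?_cons_zero, List.getElem?_cons_succ, Option.getD_some]
    norm_num
    rw [Bool.eq_iff_iff]
    simp only [Bool.and_eq_true, Bool.or_eq_true, Bool.not_eq_true', decide_eq_true_eq,
      decide_eq_false_iff_not]
    omega
  | a :: b :: c :: d :: rest => simp [List.length_cons]

-- ===== VERDICT (by name: the statement is the Claim_ definition above) =====
theorem is_valid_group_address_spec : Claim_equal_is_valid_group_address := by
  intro address _
  unfold Spec_is_valid_group_address is_valid_group_address is_valid_group_address_alt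
  cases h : (PySem.Chars.splitOn address.toList ['/']).mapM PySem.Int.ofChars? with
  | none => rfl
  | some parts => exact bodies_eq parts
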